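-- pv_equiv track=rewrite | github.com/iknoom/Problem_Solving | BOJ/23948.py | solution
-- ===== SOURCE A (Python) =====
-- def solution(n, m, arr):
--     # get min xor sum
--     min_diffs = [0] * 54
--     for bit in range(53, -1, -1):
--         x = (1 << bit)
--         one = 0
--         zero = 0
--         for e in arr:
--             if e & x:
--                 zero += x
--             else:
--                 one += x
--         min_diffs[bit] = min(one, zero)
--     min_diff_sum = sum(min_diffs)
--     if min_diff_sum > m:
--         return -1
--     # increase xor sum
--     ret = 0
--     cur_sum = min_diff_sum
--     for bit in range(53, -1, -1):
--         x = (1 << bit)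
--         nxt_diff = 0
--         for e in arr:
--             if (e & x) == 0:
--                 nxt_diff += x
--         inc = nxt_diff - min_diffs[bit]
--         if cur_sum + inc <= m:
--             cur_sum += inc
--             ret += x
--     return ret
-- ===== SOURCE B (Python) =====
-- def solution(n, m, arr):
--     # Different decomposition: one counting pass over arr into a per-bit table,
--     # a prefix array of minimal costs for bits 0..b-1, and a top-down recursion
--     # over bits threading the REMAINING budget (no cur_sum/inc bookkeeping).
--     L = len(arr)
--     cnt = {}
--     for e in arr:
--         for b in range(54):
--             if e & (1 << b):
--                 cnt[b] = cnt.get(b, 0) + 1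
--     # pre[b] = minimal achievable xor-sum cost restricted to bits 0..b-1
--     pre = [0]
--     for b in range(54):
--         x = 1 << b
--         c = cnt.get(b, 0)
--         pre.append(pre[b] + min((L - c) * x, c * x))
--     if pre[54] > m:
--         return -1
--
--     def go(bit, budget):
--         # maximise the chosen value over bits 0..bit within `budget`
--         if bit < 0:
--             return 0
--         x = 1 << bit
--         c = cnt.get(bit, 0)
--         cost1 = (L - c) * x
--         if cost1 + pre[bit] <= budget:
--             return x + go(bit - 1, budget - cost1)
--         return go(bit - 1, budget - min(cost1, c * x))
--
--     return go(53, m)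
-- ===== Notes on version B (the rewrite author's own statement) =====
-- stated objective: alternative
-- what changed: A runs two iterative bit loops that each rescan arr per bit while maintaining cur_sum/inc state; B makes one counting pass over arr, builds a prefix array of minimal suffix costs, and computes the answer by a top-down recursion over bits that threads the remaining budget (infeasibility decided once from pre[54]).
import Mathlib
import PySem

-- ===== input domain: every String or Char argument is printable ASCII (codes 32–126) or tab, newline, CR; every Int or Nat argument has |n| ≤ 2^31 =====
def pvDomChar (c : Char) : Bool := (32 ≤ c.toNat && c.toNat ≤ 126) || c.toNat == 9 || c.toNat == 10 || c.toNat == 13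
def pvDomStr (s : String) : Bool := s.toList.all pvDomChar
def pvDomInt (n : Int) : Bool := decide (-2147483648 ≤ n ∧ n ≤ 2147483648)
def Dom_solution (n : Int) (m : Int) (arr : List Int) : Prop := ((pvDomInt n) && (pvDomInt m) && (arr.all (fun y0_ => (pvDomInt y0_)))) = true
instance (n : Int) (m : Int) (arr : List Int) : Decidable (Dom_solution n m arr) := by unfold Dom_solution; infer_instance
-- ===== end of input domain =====

-- B replaces A's two stateful bit loops (each rescanning arr per bit) by one counting
-- pass, a prefix array of minimal costs, and a top-down recursion threading the
-- remaining budget (alternative decomposition, same results).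

-- ===== PORT A =====
-- literal port of A: per bit (53..0) a scan of arr for (one, zero), min_diffs via list set,
-- then the greedy loop rescanning arr for nxt_diff each bit.
def solution (n : Int) (m : Int) (arr : List Int) : Int :=
  let md := (PySem.List.pyRange 53 (-1) (-1)).foldl (fun md bit =>
      let x : Int := 1 <<< bit.toNat   -- bit ∈ [0,53] so toNat is exact
      let oz := arr.foldl (fun (p : Int × Int) e =>
          if PySem.Int.band e x ≠ 0 then (p.1, p.2 + x) else (p.1 + x, p.2)) ((0 : Int), (0 : Int))
      PySem.List.pySetD md bit (min oz.1 oz.2)) (List.replicate 54 (0 : Int))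
  let mds := md.foldl (fun acc v => acc + v) 0
  if mds > m then -1
  else
    ((PySem.List.pyRange 53 (-1) (-1)).foldl (fun (s : Int × Int) bit =>
        let x : Int := 1 <<< bit.toNat
        let nxt := arr.foldl (fun acc e => if PySem.Int.band e x = 0 then acc + x else acc) 0
        let inc := nxt - PySem.List.pyGetD md bit 0
        if s.2 + inc ≤ m then (s.1 + x, s.2 + inc) else s) ((0 : Int), mds)).1

-- ===== PORT B =====
-- B's recursive helper go(bit, budget): maximise the value over bits 0..bit within budget.
def goB (L : Int) (cnt : PySem.Dict Int Int) (pre : List Int) (bit : Int) (budget : Int) : Int :=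
  if bit < 0 then 0
  else
    let x : Int := 1 <<< bit.toNat   -- bit ∈ [0,53] so toNat is exact
    let c := cnt.getD bit 0
    let cost1 := (L - c) * x
    if cost1 + PySem.List.pyGetD pre bit 0 ≤ budget then x + goB L cnt pre (bit - 1) (budget - cost1)
    else goB L cnt pre (bit - 1) (budget - min cost1 (c * x))
termination_by (bit + 1).toNat
decreasing_by all_goals omega

-- literal port of B: one counting pass into the dict cnt, the prefix list pre of minimal
-- costs for bits 0..b-1, the -1 test on pre[54], then the recursion goB.
def solution_alt (n : Int) (m : Int) (arr : List Int) : Int :=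
  let L : Int := arr.length
  let cnt := arr.foldl (fun d e =>
      (PySem.List.pyRange 0 54 1).foldl (fun (d : PySem.Dict Int Int) b =>
          if PySem.Int.band e (1 <<< b.toNat) ≠ 0 then d.insert b (d.getD b 0 + 1) else d) d)
    PySem.Dict.empty
  let pre := (PySem.List.pyRange 0 54 1).foldl (fun (p : List Int) b =>
      let x : Int := 1 <<< b.toNat
      let c := cnt.getD b 0
      p ++ [PySem.List.pyGetD p b 0 + min ((L - c) * x) (c * x)]) [(0 : Int)]
  if PySem.List.pyGetD pre 54 0 > m then -1
  else goB L cnt pre 53 m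

-- ===== PRECONDITION & SPEC =====
def Spec_solution (n : Int) (m : Int) (arr : List Int) (out : Int) : Prop := out = solution_alt n m arr
instance (n : Int) (m : Int) (arr : List Int) (out : Int) : Decidable (Spec_solution n m arr out) := by unfold Spec_solution; infer_instance

-- ===== CLAIM (what is proved, stated in full; the proofs are below) =====
def Claim_equal_solution : Prop := ∀ (n : Int) (m : Int) (arr : List Int), Dom_solution n m arr → Spec_solution n m arr (solution n m arr)

-- ===== LEMMAS AND PROOFS =====

-- number of elements of l with the bits of x set (as an Int)
def cnt0 (l : List Int) (x : Int) : Int :=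
  (l.countP (fun e => decide (PySem.Int.band e x ≠ 0)) : Int)

-- the common per-bit quantities both programs compute, as one normal form
def minv (arr : List Int) (bit : Int) : Int :=
  min (((arr.length : Int) - cnt0 arr (1 <<< bit.toNat)) * (1 <<< bit.toNat))
      (cnt0 arr (1 <<< bit.toNat) * (1 <<< bit.toNat))

-- minimal cost over bits 0..b-1
def presum (arr : List Int) (b : Int) : Int :=
  ((PySem.List.pyRange 0 b 1).map (minv arr)).sum

def target (m : Int) (arr : List Int) : Int :=
  if presum arr 54 > m then -1
  else
    ((PySem.List.pyRange 53 (-1) (-1)).foldl (fun (s : Int × Int) bit =>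
        if s.2 + (((arr.length : Int) - cnt0 arr (1 <<< bit.toNat)) * (1 <<< bit.toNat) - minv arr bit) <= m
        then (s.1 + (1 <<< bit.toNat), s.2 + (((arr.length : Int) - cnt0 arr (1 <<< bit.toNat)) * (1 <<< bit.toNat) - minv arr bit))
        else s) ((0 : Int), presum arr 54)).1

theorem pairfold (l : List Int) (x : Int) : ∀ (o z : Int),
    l.foldl (fun (p : Int × Int) e =>
        if PySem.Int.band e x ≠ 0 then (p.1, p.2 + x) else (p.1 + x, p.2)) (o, z)
    = (o + ((l.length : Int) - cnt0 l x) * x, z + cnt0 l x * x) := by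
  induction l with
  | nil => intro o z; simp [cnt0]
  | cons e t ih =>
    intro o z
    simp only [List.foldl_cons, cnt0, List.countP_cons]
    by_cases h : PySem.Int.band e x ≠ 0
    · simp only [if_pos h, ih, cnt0]
      simp [h]
      ring
    · simp only [if_neg h, ih, cnt0]
      simp [h]
      ring

theorem nxtfold (l : List Int) (x : Int) : ∀ (a : Int),
    l.foldl (fun acc e => if PySem.Int.band e x = 0 then acc + x else acc) a
    = a + ((l.length : Int) - cnt0 l x) * x := by
  induction l with
  | nil => intro a; simp [cnt0]
  | cons e t ih =>
    intro a
    simp only [List.foldl_cons, cnt0, List.countP_cons]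
    by_cases h : PySem.Int.band e x = 0
    · simp only [if_pos h, ih, cnt0]
      simp [h]
      ring
    · simp only [if_neg h, ih, cnt0]
      simp [h]

theorem drop_set_eq_cons (l : List Int) (k : Nat) (v : Int) (h : k < l.length) :
    (l.set k v).drop k = v :: l.drop (k+1) := by
  apply List.ext_getElem
  · simp; omega
  · intro i h1 h2
    simp only [List.getElem_drop, List.getElem_set]
    rcases i with _ | j
    · simp
    · simp only [List.getElem_cons_succ, List.getElem_drop]
      rw [if_neg (by omega)]
      congr 1; omega

theorem setfold (f : Int → Int) : ∀ (k : Nat) (a : Int) (init : List Int),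
    a + 1 = (k : Int) → k ≤ init.length →
    (PySem.List.pyRange a (-1) (-1)).foldl (fun md bit => PySem.List.pySetD md bit (f bit)) init
    = (PySem.List.pyRange 0 (a + 1) 1).map f ++ init.drop k := by
  intro k
  induction k with
  | zero =>
    intro a init ha _
    have ha' : a = -1 := by omega
    subst ha'
    rw [PySem.List.pyRange_neg_one_eq_nil (by omega), PySem.List.pyRange_one_eq_nil (by omega)]
    simp
  | succ j ih =>
    intro a init ha hlen
    have ha0 : 0 ≤ a := by omega
    rw [PySem.List.pyRange_neg_one_cons (by omega)]
    simp only [List.foldl_cons]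
    rw [PySem.List.pySetD_of_nonneg (h := ha0)]
    rw [ih (a - 1) _ (by omega) (by simp; omega)]
    have hat : a.toNat = j := by omega
    rw [hat, drop_set_eq_cons _ _ _ (by omega)]
    rw [show a - 1 + 1 = a by ring]
    rw [PySem.List.pyRange_one_succ_right (by omega)]
    simp [List.map_append]

theorem dict_inner (p : Int → Prop) [DecidablePred p] (b : Int) :
    ∀ (bs : List Int) (d : PySem.Dict Int Int), bs.Nodup →
    (bs.foldl (fun d bit => if p bit then d.insert bit (d.getD bit 0 + 1) else d) d).getD b 0
    = d.getD b 0 + (if b ∈ bs ∧ p b then 1 else 0) := by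
  intro bs
  induction bs with
  | nil => intro d _; simp
  | cons a t ih =>
    intro d hnd
    have hnd' : t.Nodup := hnd.of_cons
    simp only [List.foldl_cons]
    by_cases hpa : p a
    · rw [if_pos hpa, ih _ hnd']
      rw [PySem.Dict.getD_insert]
      by_cases hba : b = a
      · subst hba
        have hbt : b ∉ t := (List.nodup_cons.mp hnd).1
        simp [hbt, hpa]
      · simp only [if_neg hba]
        have : (b ∈ a :: t ∧ p b) ↔ (b ∈ t ∧ p b) := by
          constructor
          · rintro ⟨hm, hp⟩; exact ⟨by rcases List.mem_cons.mp hm with h | h; exact absurd h hba; exact h, hp⟩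
          · rintro ⟨hm, hp⟩; exact ⟨List.mem_cons_of_mem _ hm, hp⟩
        rw [if_congr this rfl rfl]
    · rw [if_neg hpa, ih _ hnd']
      congr 1
      by_cases hba : b = a
      · subst hba; simp [hpa]
      · have : (b ∈ a :: t ∧ p b) ↔ (b ∈ t ∧ p b) := by
          constructor
          · rintro ⟨hm, hp⟩; exact ⟨by rcases List.mem_cons.mp hm with h | h; exact absurd h hba; exact h, hp⟩
          · rintro ⟨hm, hp⟩; exact ⟨List.mem_cons_of_mem _ hm, hp⟩
        rw [if_congr this rfl rfl]

theorem cnt_getD (arr : List Int) (b : Int) (hb1 : 0 ≤ b) (hb2 : b < 54) :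
    ∀ d : PySem.Dict Int Int,
    (arr.foldl (fun d e =>
        (PySem.List.pyRange 0 54 1).foldl (fun (d : PySem.Dict Int Int) bit =>
          if PySem.Int.band e (1 <<< bit.toNat) ≠ 0 then d.insert bit (d.getD bit 0 + 1) else d) d) d).getD b 0
    = d.getD b 0 + cnt0 arr (1 <<< b.toNat) := by
  induction arr with
  | nil => intro d; simp [cnt0]
  | cons e t ih =>
    intro d
    simp only [List.foldl_cons]
    rw [ih]
    rw [dict_inner (fun bit => PySem.Int.band e (1 <<< bit.toNat) ≠ 0) b _ _ (PySem.List.nodup_pyRange_one 0 54)]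
    simp only [cnt0, List.countP_cons, PySem.List.mem_pyRange_one]
    by_cases h : PySem.Int.band e (1 <<< b.toNat) ≠ 0
    · rw [if_pos ⟨⟨hb1, hb2⟩, h⟩]
      have h' : ¬ PySem.Int.band e ((1:Int) <<< b.toNat) = 0 := by simpa using h
      simp [h']
      omega
    · rw [if_neg (by tauto)]
      have h' : PySem.Int.band e ((1:Int) <<< b.toNat) = 0 := by simpa using h
      simp [h']

theorem minv_eq (arr : List Int) (bit : Int) :
    min (((arr.length : Int) - cnt0 arr (1 <<< bit.toNat)) * (1 <<< bit.toNat))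
        (cnt0 arr (1 <<< bit.toNat) * (1 <<< bit.toNat)) = minv arr bit := rfl

theorem presum_succ (arr : List Int) (k : Int) (hk : 0 ≤ k) :
    presum arr (k + 1) = presum arr k + minv arr k := by
  unfold presum
  rw [PySem.List.pyRange_one_succ_right (by omega)]
  simp

-- the md list of A is exactly the table of minv values
theorem solA (n m : Int) (arr : List Int) : solution n m arr = target m arr := by
  simp only [solution]
  simp only [pairfold, nxtfold, zero_add]
  simp only [minv_eq]
  have hmd : List.foldl (fun md bit => PySem.List.pySetD md bit (minv arr bit))
      (List.replicate 54 (0:Int)) (PySem.List.pyRange 53 (-1) (-1))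
      = (PySem.List.pyRange 0 54 1).map (minv arr) := by
    rw [setfold (minv arr) 54 53 _ (by norm_num) (by simp)]
    norm_num
  simp only [hmd]
  rw [PySem.List.foldl_add ((PySem.List.pyRange 0 54 1).map (minv arr)) (fun v => v) 0]
  simp only [List.map_id', zero_add]
  rw [PySem.List.foldl_congr_mem' (PySem.List.pyRange 53 (-1) (-1)) _
        (fun (s : Int × Int) bit =>
          if s.2 + (((arr.length : Int) - cnt0 arr (1 <<< bit.toNat)) * (1 <<< bit.toNat) - minv arr bit) <= m
          then (s.1 + (1 <<< bit.toNat), s.2 + (((arr.length : Int) - cnt0 arr (1 <<< bit.toNat)) * (1 <<< bit.toNat) - minv arr bit))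
          else s) _ ?hA]
  case hA =>
    intro bit hbit s
    rcases (PySem.List.mem_pyRange_neg_one).mp hbit with ⟨h1, h2⟩
    rw [PySem.List.pyGetD_map_pyRange_of_nonneg (minv arr) 54 bit 0 (by omega) (by omega)]
  simp only [target, presum]

-- the pre list built by B is the table of presum values
theorem preFold (arr : List Int) : ∀ (k : Nat), k ≤ 54 →
    (PySem.List.pyRange 0 (k : Int) 1).foldl (fun (p : List Int) b =>
        p ++ [PySem.List.pyGetD p b 0 + minv arr b]) [(0 : Int)]
    = (List.range (k + 1)).map (fun (j : Nat) => presum arr (j : Int)) := by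
  intro k
  induction k with
  | zero =>
    intro _
    rw [PySem.List.pyRange_one_eq_nil (by omega)]
    simp [presum, PySem.List.pyRange_one_eq_nil]
  | succ j ih =>
    intro hk
    have h1 : ((j : Int) + 1) = (((j + 1 : Nat)) : Int) := by push_cast; ring
    rw [← h1, PySem.List.pyRange_one_succ_right (by omega)]
    rw [List.foldl_append, ih (by omega)]
    simp only [List.foldl_cons, List.foldl_nil]
    have hget : PySem.List.pyGetD ((List.range (j + 1)).map (fun (i : Nat) => presum arr (i : Int))) (j : Int) 0
        = presum arr (j : Int) := by
      rw [show ((j : Int)) = ((j : Nat) : Int) from rfl, PySem.List.pyGetD_natCast]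
      rw [List.getD_eq_getElem?_getD]
      simp
    rw [hget]
    simp [List.range_succ]
    exact (presum_succ arr (j : Int) (by omega)).symm

-- the recursion goB, fed the two tables, computes A's greedy fold
theorem goB_eq (m : Int) (arr : List Int) (cnt : PySem.Dict Int Int) (pre : List Int)
    (hc : ∀ b : Int, 0 ≤ b → b < 54 → cnt.getD b 0 = cnt0 arr (1 <<< b.toNat))
    (hp : ∀ b : Int, 0 ≤ b → b ≤ 54 → PySem.List.pyGetD pre b 0 = presum arr b) :
    ∀ (k : Nat), k ≤ 54 → ∀ (acc budget : Int),
    ((PySem.List.pyRange ((k : Int) - 1) (-1) (-1)).foldl (fun (s : Int × Int) bit =>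
        if s.2 + (((arr.length : Int) - cnt0 arr (1 <<< bit.toNat)) * (1 <<< bit.toNat) - minv arr bit) <= m
        then (s.1 + (1 <<< bit.toNat), s.2 + (((arr.length : Int) - cnt0 arr (1 <<< bit.toNat)) * (1 <<< bit.toNat) - minv arr bit))
        else s)
      (acc, m - budget + presum arr (k : Int))).1
    = acc + goB (arr.length : Int) cnt pre ((k : Int) - 1) budget := by
  intro k
  induction k with
  | zero =>
    intro _ acc budget
    rw [PySem.List.pyRange_neg_one_eq_nil (by omega)]
    rw [goB]
    simp
  | succ j ih =>
    intro hk acc budget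
    have hbit : ((j + 1 : Nat) : Int) - 1 = (j : Int) := by push_cast; ring
    rw [hbit]
    rw [PySem.List.pyRange_neg_one_cons (by omega)]
    simp only [List.foldl_cons]
    rw [goB]
    rw [if_neg (show ¬((j : Int) < 0) by omega)]
    have hps : presum arr ((j + 1 : Nat) : Int) = presum arr (j : Int) + minv arr (j : Int) := by
      rw [show ((j + 1 : Nat) : Int) = (j : Int) + 1 by push_cast; ring]
      exact presum_succ arr (j : Int) (by omega)
    rw [hps]
    simp only [hc (j : Int) (by omega) (by omega), hp (j : Int) (by omega) (by omega)]
    by_cases hcond : ((arr.length : Int) - cnt0 arr ((1 <<< ((j : Int)).toNat : Nat) : Int))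
        * ((1 <<< ((j : Int)).toNat : Nat) : Int) + presum arr (j : Int) ≤ budget
    · rw [if_pos hcond]
      rw [if_pos (show m - budget + (presum arr (j : Int) + minv arr (j : Int))
            + (((arr.length : Int) - cnt0 arr ((1 <<< ((j : Int)).toNat : Nat) : Int))
                * ((1 <<< ((j : Int)).toNat : Nat) : Int) - minv arr (j : Int)) ≤ m by omega)]
      have harg : m - budget + (presum arr (j : Int) + minv arr (j : Int))
            + (((arr.length : Int) - cnt0 arr ((1 <<< ((j : Int)).toNat : Nat) : Int))
                * ((1 <<< ((j : Int)).toNat : Nat) : Int) - minv arr (j : Int))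
          = m - (budget - ((arr.length : Int) - cnt0 arr ((1 <<< ((j : Int)).toNat : Nat) : Int))
                * ((1 <<< ((j : Int)).toNat : Nat) : Int)) + presum arr (j : Int) := by ring
      rw [harg]
      rw [ih (by omega) (acc + ((1 <<< ((j : Int)).toNat : Nat) : Int))
            (budget - ((arr.length : Int) - cnt0 arr ((1 <<< ((j : Int)).toNat : Nat) : Int))
                * ((1 <<< ((j : Int)).toNat : Nat) : Int))]
      ring
    · rw [if_neg hcond]
      rw [if_neg (show ¬(m - budget + (presum arr (j : Int) + minv arr (j : Int))
            + (((arr.length : Int) - cnt0 arr ((1 <<< ((j : Int)).toNat : Nat) : Int))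
                * ((1 <<< ((j : Int)).toNat : Nat) : Int) - minv arr (j : Int)) ≤ m) by omega)]
      have harg : m - budget + (presum arr (j : Int) + minv arr (j : Int))
          = m - (budget - min (((arr.length : Int) - cnt0 arr ((1 <<< ((j : Int)).toNat : Nat) : Int))
                * ((1 <<< ((j : Int)).toNat : Nat) : Int))
                (cnt0 arr ((1 <<< ((j : Int)).toNat : Nat) : Int) * ((1 <<< ((j : Int)).toNat : Nat) : Int)))
            + presum arr (j : Int) := by
        have : minv arr (j : Int) = min (((arr.length : Int) - cnt0 arr ((1 <<< ((j : Int)).toNat : Nat) : Int))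
                * ((1 <<< ((j : Int)).toNat : Nat) : Int))
                (cnt0 arr ((1 <<< ((j : Int)).toNat : Nat) : Int) * ((1 <<< ((j : Int)).toNat : Nat) : Int)) := rfl
        rw [this]; ring
      rw [harg]
      rw [ih (by omega) acc
            (budget - min (((arr.length : Int) - cnt0 arr ((1 <<< ((j : Int)).toNat : Nat) : Int))
                * ((1 <<< ((j : Int)).toNat : Nat) : Int))
                (cnt0 arr ((1 <<< ((j : Int)).toNat : Nat) : Int) * ((1 <<< ((j : Int)).toNat : Nat) : Int)))]

theorem solB (n m : Int) (arr : List Int) : solution_alt n m arr = target m arr := by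
  simp only [solution_alt]
  have hc : ∀ b : Int, 0 ≤ b → b < 54 →
      (arr.foldl (fun d e =>
        (PySem.List.pyRange 0 54 1).foldl (fun (d : PySem.Dict Int Int) bit =>
          if PySem.Int.band e (1 <<< bit.toNat) ≠ 0 then d.insert bit (d.getD bit 0 + 1) else d) d)
        PySem.Dict.empty).getD b 0 = cnt0 arr (1 <<< b.toNat) := by
    intro b hb1 hb2
    rw [cnt_getD arr b hb1 hb2 PySem.Dict.empty, PySem.Dict.getD_empty, zero_add]
  have hpre : ((PySem.List.pyRange 0 54 1).foldl (fun (p : List Int) b =>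
      p ++ [PySem.List.pyGetD p b 0 +
        min (((arr.length : Int) - (arr.foldl (fun d e =>
          (PySem.List.pyRange 0 54 1).foldl (fun (d : PySem.Dict Int Int) bit =>
            if PySem.Int.band e (1 <<< bit.toNat) ≠ 0 then d.insert bit (d.getD bit 0 + 1) else d) d)
          PySem.Dict.empty).getD b 0) * (1 <<< b.toNat))
          ((arr.foldl (fun d e =>
          (PySem.List.pyRange 0 54 1).foldl (fun (d : PySem.Dict Int Int) bit =>
            if PySem.Int.band e (1 <<< bit.toNat) ≠ 0 then d.insert bit (d.getD bit 0 + 1) else d) d)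
          PySem.Dict.empty).getD b 0 * (1 <<< b.toNat))]) [(0 : Int)])
      = (List.range 55).map (fun (j : Nat) => presum arr (j : Int)) := by
    rw [PySem.List.foldl_congr_mem' (PySem.List.pyRange 0 54 1) _
          (fun (p : List Int) b => p ++ [PySem.List.pyGetD p b 0 + minv arr b]) _ ?hB]
    case hB =>
      intro b hb p
      rcases (PySem.List.mem_pyRange_one).mp hb with ⟨h1, h2⟩
      rw [hc b h1 h2]
      rw [minv_eq]
    exact preFold arr 54 (by omega)
  rw [hpre]
  have hp : ∀ b : Int, 0 ≤ b → b ≤ 54 →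
      PySem.List.pyGetD ((List.range 55).map (fun (j : Nat) => presum arr (j : Int))) b 0 = presum arr b := by
    intro b hb1 hb2
    rw [PySem.List.pyGetD_of_nonneg (h := hb1)]
    rw [List.getD_eq_getElem?_getD]
    have hlt : b.toNat < 55 := by omega
    simp only [List.getElem?_map, List.getElem?_range hlt, Option.map_some, Option.getD_some]
    rw [Int.toNat_of_nonneg hb1]
  rw [hp 54 (by omega) (by omega)]
  simp only [target]
  by_cases hcmp : presum arr 54 > m
  · rw [if_pos hcmp, if_pos hcmp]
  · rw [if_neg hcmp, if_neg hcmp]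
    have := goB_eq m arr _ _ hc hp 54 (by omega) 0 m
    rw [show ((54:Nat) : Int) - 1 = (53 : Int) by norm_num] at this
    rw [show ((54:Nat) : Int) = (54 : Int) from rfl] at this
    rw [show m - m + presum arr 54 = presum arr 54 by ring] at this
    rw [this]
    ring

-- ===== VERDICT (by name: the statement is the Claim_ definition above) =====
theorem solution_spec : Claim_equal_solution := by
  intro n m arr _
  unfold Spec_solution
  rw [solA n m arr, solB n m arr]
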